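-- pv_equiv track=rewrite | github.com/joeyvivili/cs-fundamentals | 01-algorithm/UCBerkeley-cs61a/practice_code_note/ex.py | remove
-- ===== SOURCE A (Python) =====
-- def remove(n,digit):
--     """Return all digits of non-negative N that are not DIGIT,
--     for some non-negative DIGIT less than 10
--
--     >>> remove(231, 3)
--     21
--     >>> remove(243132, 2)
--     4313
--     >>> remove(5677432, 7)
--     56432
--     >>> remove(5677032, 7)
--     56032
--     >>> remove(3970882, 0)
--     397882
--     """
--     kept, digits = 0, 1
--     while n > 0:
--         n, last = n // 10, n % 10
--         if last != digit:
--             kept = kept + digits * last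
--             digits = digits * 10
--     return kept
-- ===== SOURCE B (Python) =====
-- def remove(n, digit):
--     d = str(digit)
--     total = 0
--     for c in str(n):
--         if c != d:
--             total = 10 * total + int(c)
--     return total
-- ===== Notes on version B (the rewrite author's own statement) =====
-- stated objective: alternative
-- what changed: B converts n to its decimal string and folds over the characters most-significant-first with a Horner reconstruction (total = 10*total + int(c)), instead of A's least-significant-first modulo/divide loop that maintains a separate place-value accumulator.
-- outside the precondition, e.g. on remove(-231, 3): A returns 0, B raises ValueError
import Mathlib
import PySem

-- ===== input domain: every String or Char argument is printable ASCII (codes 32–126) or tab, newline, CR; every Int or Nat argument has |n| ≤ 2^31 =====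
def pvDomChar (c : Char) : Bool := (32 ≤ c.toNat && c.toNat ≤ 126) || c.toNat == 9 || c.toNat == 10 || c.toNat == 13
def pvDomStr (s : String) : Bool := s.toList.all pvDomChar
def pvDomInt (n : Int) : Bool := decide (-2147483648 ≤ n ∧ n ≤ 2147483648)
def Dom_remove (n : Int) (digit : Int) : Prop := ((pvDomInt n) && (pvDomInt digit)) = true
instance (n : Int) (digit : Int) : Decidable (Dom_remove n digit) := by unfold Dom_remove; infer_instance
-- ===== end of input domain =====

-- B filters the decimal string of n most-significant-first with a Horner reconstruction instead of
-- A's LSB modulo loop with a place-value accumulator (objective: alternative, no speed claim).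
-- Pre_ restricts to 0 ≤ n, the documented domain ("non-negative N"): on negative n B's int(c)
-- raises ValueError on the '-' character while A returns 0 from the unentered loop.


-- ===== PORT A =====
-- the 'while n > 0' loop of A, state (n, kept, digits)
def removeLoopA (digit n kept digits : Int) : Int :=
  if h : 0 < n then
    if PySem.Int.mod n 10 ≠ digit then
      removeLoopA digit (PySem.Int.floordiv n 10) (kept + digits * PySem.Int.mod n 10) (digits * 10)
    else
      removeLoopA digit (PySem.Int.floordiv n 10) kept digits
  else kept
termination_by n.toNat
decreasing_by
  all_goals rw [PySem.Int.floordiv_eq_ediv_of_pos (by norm_num : (0:Int) < 10)]; omega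

def remove (n : Int) (digit : Int) : Int := removeLoopA digit n 0 1

-- ===== PORT B =====
-- one step of B's 'for c in str(n)' loop; the Option threads int(c)'s possible ValueError
-- (none), which never fires under Pre_remove (0 ≤ n), where every character is a decimal digit.
def removeStepB (d : List Char) (acc : Option Int) (c : Char) : Option Int :=
  acc.bind fun t =>
    if [c] ≠ d then (PySem.Int.ofChars? [c]).map (fun v => 10 * t + v) else some t

def remove_alt (n : Int) (digit : Int) : Int :=
  ((PySem.Int.toChars n).foldl (removeStepB (PySem.Int.toChars digit)) (some 0)).getD 0

-- ===== PRECONDITION & SPEC =====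
-- Pre_ excludes negative n, outside the documented domain ("non-negative N"): there A returns 0
-- from the unentered loop while B raises ValueError (int('-')).
def Pre_remove (n : Int) (digit : Int) : Prop := 0 ≤ n
instance (n : Int) (digit : Int) : Decidable (Pre_remove n digit) := by unfold Pre_remove; infer_instance
def pvWitness_remove : Int × Int := (231, 3)

def Spec_remove (n : Int) (digit : Int) (out : Int) : Prop := out = remove_alt n digit
instance (n : Int) (digit : Int) (out : Int) : Decidable (Spec_remove n digit out) := by unfold Spec_remove; infer_instance

-- ===== CLAIM (what is proved, stated in full; the proofs are below) =====
def Claim_equal_remove : Prop := ∀ (n : Int) (digit : Int), Dom_remove n digit → Pre_remove n digit → Spec_remove n digit (remove n digit)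

-- ===== LEMMAS AND PROOFS =====

-- common specification: value of the kept digits, digit list given LSB-first
def keptVal (digit : Int) : List Nat → Int
  | [] => 0
  | d :: t => if (d : Int) = digit then keptVal digit t else keptVal digit t * 10 + d

-- the pure (Option-free) step of B over the numeric digit, MSB-first
def stepB (digit t : Int) (d : Nat) : Int := if (d : Int) = digit then t else 10 * t + d

-- Nat.toDigits agrees with Mathlib's Nat.digits for positive numbers
lemma toDigitsCore_eq_digits : ∀ (f m : Nat) (acc : List Char), 0 < m → m < f →
    Nat.toDigitsCore 10 f m acc = (Nat.digits 10 m).reverse.map Nat.digitChar ++ acc := by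
  intro f
  induction f with
  | zero => intro m acc h1 h2; omega
  | succ f ih =>
    intro m acc hm hmf
    rw [Nat.toDigitsCore]
    rw [Nat.digits_def' (by norm_num : 1 < 10) hm]
    by_cases hq : m / 10 = 0
    · simp [hq]
    · simp only [hq, if_false]
      rw [ih (m / 10) _ (Nat.pos_of_ne_zero hq) (by omega)]
      simp

lemma toDigits_eq_digits (m : Nat) (hm : 0 < m) :
    Nat.toDigits 10 m = (Nat.digits 10 m).reverse.map Nat.digitChar := by
  rw [Nat.toDigits, toDigitsCore_eq_digits (m+1) m [] hm (by omega), List.append_nil]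

lemma toDigits_ne_nil (m : Nat) : Nat.toDigits 10 m ≠ [] := by
  by_cases hm : 0 < m
  · rw [toDigits_eq_digits m hm]
    have h1 : Nat.digits 10 m ≠ [] := Nat.digits_ne_nil_iff_ne_zero.mpr (by omega)
    simpa using h1
  · have : m = 0 := by omega
    subst this; decide

lemma ofChars?_digitChar (d : Nat) (hd : d < 10) :
    PySem.Int.ofChars? [Nat.digitChar d] = some (d : Int) := by
  interval_cases d <;> decide

lemma digitChar_inj (d e : Nat) (hd : d < 10) (he : e < 10)
    (h : Nat.digitChar d = Nat.digitChar e) : d = e := by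
  interval_cases d <;> interval_cases e <;> simp_all <;> revert h <;> decide

lemma digits_lt_ten {m : Nat} (hm : 0 < m) (h : m < 10) : Nat.digits 10 m = [m] := by
  rw [Nat.digits_def' (by norm_num : 1 < 10) hm]
  simp [Nat.mod_eq_of_lt h, Nat.div_eq_of_lt h]

-- the character test of B against the numeric test of A
lemma digitChar_eq_toChars_iff (d : Nat) (hd : d < 10) (digit : Int)
    (hdig : digit ≤ 2147483648) :
    [Nat.digitChar d] = PySem.Int.toChars digit ↔ (d : Int) = digit := by
  unfold PySem.Int.toChars
  by_cases hneg : digit < 0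
  · rw [if_pos hneg]
    constructor
    · intro h
      have hnil : Nat.toDigits 10 digit.natAbs = [] := (List.cons_eq_cons.mp h).2.symm
      exact absurd hnil (toDigits_ne_nil _)
    · intro h; omega
  · rw [if_neg hneg]
    push Not at hneg
    by_cases hz : digit.toNat = 0
    · have : digit = 0 := by omega
      subst this
      show [Nat.digitChar d] = Nat.toDigits 10 0 ↔ _
      constructor
      · intro h
        have : Nat.digitChar d = '0' := by
          have := congrArg (fun l => l.headD ' ') h
          simpa [Nat.toDigits, Nat.toDigitsCore] using this
        have := digitChar_inj d 0 hd (by norm_num) (by simpa using this)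
        omega
      · intro h
        have : d = 0 := by omega
        subst this; rfl
    · have hpos : 0 < digit.toNat := Nat.pos_of_ne_zero hz
      rw [toDigits_eq_digits _ hpos]
      by_cases hlt : digit.toNat < 10
      · rw [digits_lt_ten hpos hlt]
        simp only [List.reverse_cons, List.reverse_nil, List.nil_append, List.map_cons,
          List.map_nil, List.cons.injEq, and_true]
        constructor
        · intro h
          have := digitChar_inj d digit.toNat hd hlt h
          omega
        · intro h
          have : d = digit.toNat := by omega
          rw [this]
      · constructor
        · intro h
          have hlen := congrArg List.length h
          simp at hlen
          have h2 : digit.toNat < 10 ^ (Nat.digits 10 digit.toNat).length :=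
            Nat.lt_base_pow_length_digits (by norm_num)
          rw [← hlen] at h2
          omega
        · intro h; omega

-- A's loop computes kept + digits * keptVal
lemma removeLoopA_eq (digit : Int) : ∀ (m : Nat) (kept digits : Int),
    removeLoopA digit (m : Int) kept digits = kept + digits * keptVal digit (Nat.digits 10 m) := by
  intro m
  induction m using Nat.strong_induction_on with
  | _ m ih =>
    intro kept digits
    rw [removeLoopA]
    by_cases hm : 0 < m
    · rw [dif_pos (by exact_mod_cast hm)]
      have hmod : PySem.Int.mod (m : Int) 10 = ((m % 10 : Nat) : Int) := by
        rw [PySem.Int.mod_eq_emod_of_pos (by norm_num)]; omega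
      have hdiv : PySem.Int.floordiv (m : Int) 10 = ((m / 10 : Nat) : Int) := by
        rw [PySem.Int.floordiv_eq_ediv_of_pos (by norm_num)]; omega
      rw [hmod, hdiv, Nat.digits_def' (by norm_num : 1 < 10) hm]
      by_cases hc : ((m % 10 : Nat) : Int) = digit
      · rw [if_neg (by simpa using hc), ih (m / 10) (Nat.div_lt_self hm (by norm_num))]
        simp [keptVal, hc]
      · rw [if_pos (by simpa using hc), ih (m / 10) (Nat.div_lt_self hm (by norm_num))]
        simp only [keptVal, if_neg hc]
        ring
    · have : m = 0 := by omega
      subst this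
      rw [dif_neg (by norm_num)]
      simp [keptVal, Nat.digits_zero]

-- B's Option fold over digit characters is the pure fold on the digit values
lemma foldB_eq (digit : Int) (hdig : digit ≤ 2147483648) :
    ∀ (L : List Nat), (∀ d ∈ L, d < 10) → ∀ t : Int,
    (L.map Nat.digitChar).foldl (removeStepB (PySem.Int.toChars digit)) (some t) =
      some (L.foldl (stepB digit) t) := by
  intro L
  induction L with
  | nil => intro _ t; rfl
  | cons d L ih =>
    intro hb t
    have hd : d < 10 := hb d (by simp)
    have hstep : removeStepB (PySem.Int.toChars digit) (some t) (Nat.digitChar d) =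
        some (stepB digit t d) := by
      unfold removeStepB stepB
      by_cases hc : (d : Int) = digit
      · rw [Option.bind_some, if_neg (by
          simpa using (digitChar_eq_toChars_iff d hd digit hdig).mpr hc), if_pos hc]
      · rw [Option.bind_some, if_pos (by
          simpa using fun h => hc ((digitChar_eq_toChars_iff d hd digit hdig).mp h)),
          ofChars?_digitChar d hd, Option.map_some, if_neg hc]
    simp only [List.map_cons, List.foldl_cons, hstep]
    exact ih (fun e he => hb e (by simp [he])) _

-- Horner over the reversed (MSB-first) digit list is keptVal
lemma foldB_reverse_eq (digit : Int) : ∀ (L : List Nat) (t : Int),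
    L.reverse.foldl (stepB digit) t =
      t * 10 ^ (L.countP (fun d : Nat => decide ((d : Int) ≠ digit))) + keptVal digit L := by
  intro L
  induction L with
  | nil => intro t; simp [keptVal]
  | cons d L ih =>
    intro t
    rw [List.reverse_cons, List.foldl_append, ih t]
    by_cases hc : (d : Int) = digit
    · simp [stepB, keptVal, hc]
    · simp only [List.foldl_cons, List.foldl_nil, stepB, keptVal, List.countP_cons, hc,
        if_false, ne_eq, not_false_iff, decide_true]
      rw [if_pos trivial, pow_succ]
      ring

-- ===== VERDICT (by name: the statement is the Claim_ definition above) =====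
theorem remove_spec : Claim_equal_remove := by
  intro n digit hdom hpre
  have hdig : digit ≤ 2147483648 := by
    simp only [Dom_remove, pvDomInt, Bool.and_eq_true, decide_eq_true_eq] at hdom
    omega
  have h0 : (0:Int) ≤ n := hpre
  obtain ⟨m, rfl⟩ : ∃ m : Nat, n = ((m : Nat) : Int) := ⟨n.toNat, by omega⟩
  show remove ((m : Nat) : Int) digit = remove_alt ((m : Nat) : Int) digit
  have hA : remove ((m : Nat) : Int) digit = keptVal digit (Nat.digits 10 m) := by
    rw [remove, removeLoopA_eq]
    ring
  have htoChars : PySem.Int.toChars ((m : Nat) : Int) = Nat.toDigits 10 m := by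
    simp [PySem.Int.toChars]
  by_cases hz : m = 0
  · subst hz
    rw [hA]
    show _ = ((PySem.Int.toChars 0).foldl (removeStepB (PySem.Int.toChars digit)) (some 0)).getD 0
    have h0 : PySem.Int.toChars 0 = ['0'] := rfl
    rw [h0]
    simp only [List.foldl_cons, List.foldl_nil, removeStepB, Option.bind_some]
    have hof : PySem.Int.ofChars? ['0'] = some 0 := by decide
    rw [hof]
    split
    · simp [keptVal, Nat.digits_zero]
    · simp [keptVal, Nat.digits_zero]
  · have hmpos : 0 < m := Nat.pos_of_ne_zero hz
    rw [hA]
    show _ = ((PySem.Int.toChars ((m : Nat) : Int)).foldl (removeStepB (PySem.Int.toChars digit)) (some 0)).getD 0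
    rw [htoChars, toDigits_eq_digits m hmpos,
      foldB_eq digit hdig _ (fun d hd => Nat.digits_lt_base (by norm_num)
        (List.mem_reverse.mp hd)), foldB_reverse_eq]
    simp
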